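-- pv_equiv track=rewrite | github.com/orionmc/UD | DataExtraction.py | strip_signature
-- ===== SOURCE A (Python) =====
-- SIGNATURE_TRIGGERS = [              # A common email signature delimiter
--     "Kind regards",
--     "Best regards",
--     "Sent from my",
--     "Sincerely",
--     "Connor",                       # Specific names of the parties involved in hardware collection from the warehouse
--     "Stuart",                       # The signature follows the name and there is no need to process the text after the sender's name
--     "Nihat",
--     "Nelson",
--     "Ronnie",
--     "Michael",
--     "Darren",
--     "David",
--     "Alan",
--     "Ben",
--     "Ritesh",
--     "Thabani",
-- ]
--
-- def strip_signature(body, triggers=SIGNATURE_TRIGGERS):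
--     # My approach: given an email body (string), find the earliest occurrence of any 'trigger' phrase
--     # and return only the text before that occurrence.
--     # Normalize to a common case (lower) for searching
--     body_lower = body.lower()
--     earliest_index = len(body)
--     for trigger in triggers:
--         trigger_index = body_lower.find(trigger.lower())
--         if trigger_index != -1 and trigger_index < earliest_index:
--             earliest_index = trigger_index
--     return body[:earliest_index].rstrip()
-- ===== SOURCE B (Python) =====
-- SIGNATURE_TRIGGERS = [
--     "Kind regards",
--     "Best regards",
--     "Sent from my",
--     "Sincerely",
--     "Connor",
--     "Stuart",
--     "Nihat",
--     "Nelson",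
--     "Ronnie",
--     "Michael",
--     "Darren",
--     "David",
--     "Alan",
--     "Ben",
--     "Ritesh",
--     "Thabani",
-- ]
--
-- def strip_signature(body, triggers=SIGNATURE_TRIGGERS):
--     # Single left-to-right scan: stop at the first position where any
--     # (lower-cased) trigger starts; no per-trigger find() + running minimum.
--     lowered = [t.lower() for t in triggers]
--     body_lower = body.lower()
--     for i in range(len(body)):
--         tail = body_lower[i:]
--         if any(tail.startswith(t) for t in lowered):
--             return body[:i].rstrip()
--     return body.rstrip()
-- ===== Notes on version B (the rewrite author's own statement) =====
-- stated objective: faster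
-- what changed: A runs find() over the whole body once per trigger and keeps a running minimum index; B does a single left-to-right scan of the lowered body and returns at the first position where any lowered trigger is a prefix, so it never scans past the earliest match.
import Mathlib
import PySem

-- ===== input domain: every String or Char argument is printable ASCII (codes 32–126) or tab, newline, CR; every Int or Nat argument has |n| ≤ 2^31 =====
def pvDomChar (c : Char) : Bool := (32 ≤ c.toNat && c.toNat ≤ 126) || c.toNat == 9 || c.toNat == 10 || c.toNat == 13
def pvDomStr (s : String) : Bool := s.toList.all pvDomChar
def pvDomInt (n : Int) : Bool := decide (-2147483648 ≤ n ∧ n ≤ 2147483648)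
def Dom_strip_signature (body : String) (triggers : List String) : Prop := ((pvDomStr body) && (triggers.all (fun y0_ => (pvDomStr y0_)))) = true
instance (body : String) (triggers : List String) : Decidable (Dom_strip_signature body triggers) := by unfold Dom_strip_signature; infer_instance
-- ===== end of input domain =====

-- B replaces A's per-trigger find() + running-minimum loop by a single
-- left-to-right scan that returns at the first position where any lowered
-- trigger starts (objective: faster — early exit, measured).

-- ===== PORT A =====
def strip_signature (body : String) (triggers : List String) : String :=
  let body_lower := PySem.Str.lower body
  let earliest_index :=
    triggers.foldl (fun acc trigger =>
      let trigger_index := PySem.Str.find body_lower (PySem.Str.lower trigger)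
      if trigger_index ≠ -1 ∧ trigger_index < acc then trigger_index else acc)
      (PySem.Str.len body)
  PySem.Str.rstrip (PySem.Str.slice body none (some earliest_index))

-- ===== PORT B =====
def pvAltLoop (body : String) (lows : List (List Char)) : List Char → Nat → String
  | [], _ => PySem.Str.rstrip body
  | tail@(_ :: rest), i =>
      if lows.any (fun t => PySem.Chars.startswith tail t) then
        PySem.Str.rstrip (PySem.Str.slice body none (some (i : Int)))
      else pvAltLoop body lows rest (i + 1)

def strip_signature_alt (body : String) (triggers : List String) : String :=
  let lows := triggers.map (fun t => PySem.Chars.lower t.toList)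
  pvAltLoop body lows (PySem.Chars.lower body.toList) 0

-- ===== PRECONDITION & SPEC =====
def Spec_strip_signature (body : String) (triggers : List String) (out : String) : Prop := out = strip_signature_alt body triggers
instance (body : String) (triggers : List String) (out : String) : Decidable (Spec_strip_signature body triggers out) := by unfold Spec_strip_signature; infer_instance

-- ===== CLAIM (what is proved, stated in full; the proofs are below) =====
def Claim_equal_strip_signature : Prop := ∀ (body : String) (triggers : List String), Dom_strip_signature body triggers → Spec_strip_signature body triggers (strip_signature body triggers)

-- ===== LEMMAS AND PROOFS =====

-- lower is a character map, so it preserves length and commutes with drop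
theorem pv_lower_length (s : List Char) : (PySem.Chars.lower s).length = s.length := by
  simp [PySem.Chars.lower]

-- A's fold computes the least index at which some trigger matches (or the length)
theorem pv_foldA_spec (bl : List Char) (trigAll : List String) :
    ∀ (ts : List String), (∀ t ∈ ts, t ∈ trigAll) → ∀ (acc : Int), 0 ≤ acc → acc ≤ bl.length →
    (acc = bl.length ∨ ∃ t ∈ trigAll, PySem.Chars.lower t.toList <+: bl.drop acc.toNat) →
    (let e := ts.foldl (fun a t =>
        if PySem.Chars.find bl (PySem.Chars.lower t.toList) ≠ -1 ∧
            PySem.Chars.find bl (PySem.Chars.lower t.toList) < a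
        then PySem.Chars.find bl (PySem.Chars.lower t.toList) else a) acc
     0 ≤ e ∧ e ≤ acc ∧
     (e = bl.length ∨ ∃ t ∈ trigAll, PySem.Chars.lower t.toList <+: bl.drop e.toNat) ∧
     ∀ t ∈ ts, ∀ j : Nat, (j : Int) < e → ¬ (PySem.Chars.lower t.toList <+: bl.drop j)) := by
  intro ts
  induction ts with
  | nil =>
    intro _ acc h0 h1 h2
    exact ⟨h0, le_rfl, h2, by simp⟩
  | cons t ts ih =>
    intro hsub acc h0 h1 h2
    simp only [List.foldl_cons]
    have htn : PySem.Chars.find bl (PySem.Chars.lower t.toList) ≤ (bl.length : Int) :=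
      PySem.Chars.find_le_length _ _
    have hge : -1 ≤ PySem.Chars.find bl (PySem.Chars.lower t.toList) :=
      PySem.Chars.neg_one_le_find _ _
    by_cases hc : PySem.Chars.find bl (PySem.Chars.lower t.toList) ≠ -1 ∧
        PySem.Chars.find bl (PySem.Chars.lower t.toList) < acc
    · rw [if_pos hc]
      have h0' : 0 ≤ PySem.Chars.find bl (PySem.Chars.lower t.toList) := by
        rcases hc with ⟨h, _⟩; omega
      have hpre := PySem.Chars.find_spec (s := bl) (sub := PySem.Chars.lower t.toList) h0'
      obtain ⟨e0, ele, ehit, emin⟩ := ih (fun u hu => hsub u (List.mem_cons_of_mem _ hu)) _ h0' htn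
        (Or.inr ⟨t, hsub t List.mem_cons_self, hpre.1⟩)
      refine ⟨e0, by omega, ehit, ?_⟩
      intro u hu j hj
      rcases List.mem_cons.mp hu with rfl | hu'
      · exact hpre.2 j (by omega)
      · exact emin u hu' j hj
    · rw [if_neg hc]
      obtain ⟨e0, ele, ehit, emin⟩ := ih (fun u hu => hsub u (List.mem_cons_of_mem _ hu)) acc h0 h1 h2
      refine ⟨e0, ele, ehit, ?_⟩
      intro u hu j hj
      rcases List.mem_cons.mp hu with rfl | hu'
      · by_cases hti1 : PySem.Chars.find bl (PySem.Chars.lower u.toList) = -1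
        · intro hp
          have hin : PySem.Chars.isIn (PySem.Chars.lower u.toList) bl = true :=
            (PySem.Chars.exists_prefix_drop_iff_isIn _ _).mp ⟨j, hp⟩
          have hinf := (PySem.Chars.isIn_iff_infix _ _).mp hin
          exact (PySem.Chars.find_eq_neg_one_iff bl (PySem.Chars.lower u.toList)).mp hti1 hinf
        · have hge0 : 0 ≤ PySem.Chars.find bl (PySem.Chars.lower u.toList) := by omega
          have hac : acc ≤ PySem.Chars.find bl (PySem.Chars.lower u.toList) := by
            by_contra hlt
            exact hc ⟨hti1, by omega⟩
          exact (PySem.Chars.find_spec hge0).2 j (by omega)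
      · exact emin u hu' j hj

-- B's scan, started inside a region with no earlier match, returns A's truncation
theorem pv_loopB_spec (body : String) (lows : List (List Char)) (e : Int)
    (he : e ≤ (PySem.Chars.lower body.toList).length)
    (hhit : e = (PySem.Chars.lower body.toList).length ∨
      ∃ u ∈ lows, u <+: (PySem.Chars.lower body.toList).drop e.toNat)
    (hmin : ∀ u ∈ lows, ∀ j : Nat, (j : Int) < e → ¬ (u <+: (PySem.Chars.lower body.toList).drop j)) :
    ∀ (s : List Char) (i : Nat), s = (PySem.Chars.lower body.toList).drop i → (i : Int) ≤ e →
    pvAltLoop body lows s i = PySem.Str.rstrip (PySem.Str.slice body none (some e)) := by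
  intro s
  induction s with
  | nil =>
    intro i hs hi
    have hlen : (PySem.Chars.lower body.toList).length ≤ i := by
      rw [← List.drop_eq_nil_iff]; exact hs.symm
    have hei : e = ((PySem.Chars.lower body.toList).length : Int) := by omega
    have hfull : PySem.Str.slice body none (some e) = body := by
      apply String.toList_inj.mp
      rw [PySem.Str.toList_slice, hei, pv_lower_length]
      simp [PySem.Chars.slice]
    rw [hfull, pvAltLoop]
  | cons c rest ih =>
    intro i hs hi
    have hlt : i < (PySem.Chars.lower body.toList).length := by
      by_contra hge
      rw [List.drop_eq_nil_iff.mpr (by omega)] at hs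
      exact List.cons_ne_nil c rest hs
    by_cases hc : ∃ u ∈ lows, u <+: (PySem.Chars.lower body.toList).drop i
    · obtain ⟨u, hu, hp⟩ := hc
      have hany : lows.any (fun t => PySem.Chars.startswith (c :: rest) t) = true := by
        rw [List.any_eq_true]
        exact ⟨u, hu, (PySem.Chars.startswith_iff _ _).mpr (hs ▸ hp)⟩
      have hie : (i : Int) = e := by
        by_contra hne
        exact hmin u hu i (by omega) hp
      rw [pvAltLoop, if_pos hany, hie]
    · have hany : lows.any (fun t => PySem.Chars.startswith (c :: rest) t) = false := by
        rw [List.any_eq_false]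
        intro u hu hsw
        exact hc ⟨u, hu, hs ▸ (PySem.Chars.startswith_iff _ _).mp hsw⟩
      have hne : (i : Int) ≠ e := by
        intro hie
        rcases hhit with h1 | ⟨u, hu, hp⟩
        · omega
        · refine hc ⟨u, hu, ?_⟩
          have : e.toNat = i := by omega
          rwa [this] at hp
      rw [pvAltLoop, if_neg (by simp [hany])]
      refine ih (i + 1) ?_ (by omega)
      have : (PySem.Chars.lower body.toList).drop (i + 1) =
          ((PySem.Chars.lower body.toList).drop i).tail := by
        rw [List.tail_drop]
      rw [this, ← hs]
      rfl

-- ===== VERDICT (by name: the statement is the Claim_ definition above) =====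
theorem strip_signature_spec : Claim_equal_strip_signature := by
  intro body triggers _
  unfold Spec_strip_signature strip_signature strip_signature_alt
  simp only [PySem.Str.find_eq, PySem.Str.toList_lower, PySem.Str.len_eq]
  rw [show ((body.toList.length : Int)) = (((PySem.Chars.lower body.toList).length : Int)) by
    rw [pv_lower_length]]
  have h := pv_foldA_spec (PySem.Chars.lower body.toList) triggers triggers (fun t ht => ht)
    ((PySem.Chars.lower body.toList).length : Int) (by positivity) le_rfl (Or.inl rfl)
  obtain ⟨h0, hle, hhit, hmin⟩ := h
  refine (pv_loopB_spec body (triggers.map (fun t => PySem.Chars.lower t.toList)) _ hle ?_ ?_ (PySem.Chars.lower body.toList) 0 (by simp) h0).symm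
  · simpa [List.mem_map] using hhit
  · simpa [List.mem_map] using hmin
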